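-- pv_equiv track=rewrite | github.com/rjruizes/kptn | caching/TaskStateCache.py | check_overall_status
-- ===== SOURCE A (Python) =====
-- def check_overall_status(statuses):
--     """Determine the overall status of a list of statuses"""
--     total = len(statuses)
--     success = sum(status == "SUCCESS" for status in statuses)
--     if success == total:
--         return "SUCCESS"
--     elif success == 0:
--         return "FAILURE"
--     else:
--         return "INCOMPLETE"
-- ===== SOURCE B (Python) =====
-- def check_overall_status(statuses):
--     """Determine the overall status of a list of statuses"""
--     seen_success = False
--     seen_other = False
--     for status in statuses:
--         if status == "SUCCESS":
--             seen_success = True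
--         else:
--             seen_other = True
--         if seen_success and seen_other:
--             return "INCOMPLETE"
--     return "FAILURE" if seen_other else "SUCCESS"
-- ===== Notes on version B (the rewrite author's own statement) =====
-- stated objective: alternative
-- what changed: Replaced A's count-everything-then-compare with a single early-exiting state machine over two seen flags that returns 'INCOMPLETE' as soon as both a success and a non-success are observed.
import Mathlib
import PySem

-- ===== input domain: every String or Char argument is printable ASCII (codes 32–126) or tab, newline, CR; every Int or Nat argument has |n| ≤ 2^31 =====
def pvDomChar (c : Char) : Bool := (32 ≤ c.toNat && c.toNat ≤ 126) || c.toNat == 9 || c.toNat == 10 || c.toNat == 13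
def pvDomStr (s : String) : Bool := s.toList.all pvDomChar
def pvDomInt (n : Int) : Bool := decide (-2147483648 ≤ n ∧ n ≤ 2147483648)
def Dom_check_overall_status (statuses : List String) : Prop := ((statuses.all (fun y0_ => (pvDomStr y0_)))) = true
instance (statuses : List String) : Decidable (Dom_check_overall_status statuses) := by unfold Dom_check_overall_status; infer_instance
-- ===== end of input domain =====

-- B replaces A's count-then-compare with a single early-exiting pass over two seen-flags (alternative; same O(n) cost, early exit on mixed input).

-- ===== PORT A =====
-- A: total = len(statuses); success = sum(status == "SUCCESS" for status in statuses); then compare.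
def check_overall_status (statuses : List String) : String :=
  let total : Int := statuses.length
  let success : Int := statuses.foldl (fun acc status => acc + (if status == "SUCCESS" then 1 else 0)) 0
  if success == total then "SUCCESS"
  else if success == 0 then "FAILURE"
  else "INCOMPLETE"

-- ===== PORT B =====
-- B's loop: two seen-flags, early return "INCOMPLETE" once both are set.
def check_overall_status_alt_go (rest : List String) (seen_success seen_other : Bool) : String :=
  match rest with
  | [] => if seen_other then "FAILURE" else "SUCCESS"
  | status :: rest =>
    let seen_success := if status == "SUCCESS" then true else seen_success
    let seen_other := if status == "SUCCESS" then seen_other else true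
    if seen_success && seen_other then "INCOMPLETE"
    else check_overall_status_alt_go rest seen_success seen_other

def check_overall_status_alt (statuses : List String) : String :=
  check_overall_status_alt_go statuses false false

-- ===== PRECONDITION & SPEC =====
def Spec_check_overall_status (statuses : List String) (out : String) : Prop := out = check_overall_status_alt statuses
instance (statuses : List String) (out : String) : Decidable (Spec_check_overall_status statuses out) := by unfold Spec_check_overall_status; infer_instance

-- ===== CLAIM (what is proved, stated in full; the proofs are below) =====
def Claim_equal_check_overall_status : Prop := ∀ (statuses : List String), Dom_check_overall_status statuses → Spec_check_overall_status statuses (check_overall_status statuses)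

-- ===== LEMMAS AND PROOFS =====

theorem pv_foldl_count (statuses : List String) (acc : Int) :
    statuses.foldl (fun acc status => acc + (if status == "SUCCESS" then 1 else 0)) acc
      = acc + (statuses.countP (fun s => s == "SUCCESS") : Int) := by
  induction statuses generalizing acc with
  | nil => simp
  | cons h t ih =>
    simp only [List.foldl_cons, ih, List.countP_cons]
    split <;> simp_all <;> push_cast <;> ring

-- characterization of B's loop via any, for non-exited states
theorem pv_go_char (l : List String) :
    ∀ ss so : Bool, ¬(ss = true ∧ so = true) →
    check_overall_status_alt_go l ss so =
      if (ss || l.any (fun s => s == "SUCCESS")) && (so || l.any (fun s => !(s == "SUCCESS"))) then "INCOMPLETE"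
      else if so || l.any (fun s => !(s == "SUCCESS")) then "FAILURE"
      else "SUCCESS" := by
  induction l with
  | nil =>
    intro ss so h
    simp only [check_overall_status_alt_go, List.any_nil, Bool.or_false]
    cases ss <;> cases so <;> simp_all
  | cons s t ih =>
    intro ss so h
    cases hsb : (s == "SUCCESS") with
    | true =>
      cases so with
      | true =>
        have hss : ss = false := by
          cases ss
          · rfl
          · exact absurd ⟨rfl, rfl⟩ h
        simp [check_overall_status_alt_go, hsb, hss]
      | false =>
        simp only [check_overall_status_alt_go, hsb, List.any_cons, reduceIte,
          Bool.true_and, Bool.and_false, Bool.false_eq_true, Bool.true_or, Bool.false_or,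
          Bool.not_true]
        rw [ih true false (by simp)]
        simp
    | false =>
      cases ss with
      | true =>
        simp [check_overall_status_alt_go, hsb]
      | false =>
        simp only [check_overall_status_alt_go, hsb, List.any_cons, reduceIte,
          Bool.false_and, Bool.and_true, Bool.false_eq_true, Bool.true_or, Bool.false_or,
          Bool.not_false]
        rw [ih false true (by simp)]
        simp

theorem pv_equal (statuses : List String) :
    check_overall_status statuses = check_overall_status_alt statuses := by
  unfold check_overall_status check_overall_status_alt
  rw [pv_go_char statuses false false (by simp)]
  simp only [pv_foldl_count, zero_add, Bool.false_or]
  have hcl : statuses.countP (fun s => s == "SUCCESS") = statuses.length ↔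
      statuses.any (fun s => !(s == "SUCCESS")) = false := by
    rw [List.countP_eq_length, List.any_eq_false]
    constructor
    · intro h x hx; simp [h x hx]
    · intro h x hx; have := h x hx; simpa using this
  have hcz : statuses.countP (fun s => s == "SUCCESS") = 0 ↔
      statuses.any (fun s => s == "SUCCESS") = false := by
    rw [List.countP_eq_zero, List.any_eq_false]
  by_cases hlen : statuses.countP (fun s => s == "SUCCESS") = statuses.length
  · have ho := hcl.mp hlen
    have : ((statuses.countP (fun s => s == "SUCCESS") : Int) = (statuses.length : Int)) := by
      exact_mod_cast hlen
    simp [this, ho]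
  · have ho : statuses.any (fun s => !(s == "SUCCESS")) = true := by
      cases h : statuses.any (fun s => !(s == "SUCCESS")) with
      | true => rfl
      | false => exact absurd (hcl.mpr h) hlen
    have hne : ¬ ((statuses.countP (fun s => s == "SUCCESS") : Int) = (statuses.length : Int)) := by
      exact_mod_cast hlen
    by_cases hz : statuses.countP (fun s => s == "SUCCESS") = 0
    · have hany := hcz.mp hz
      have hz' : ((statuses.countP (fun s => s == "SUCCESS") : Int) = 0) := by exact_mod_cast hz
      simp [ho, hany, hz']
      exact_mod_cast (show ¬(0:ℕ) = statuses.length by omega)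
    · have hany : statuses.any (fun s => s == "SUCCESS") = true := by
        cases h : statuses.any (fun s => s == "SUCCESS") with
        | true => rfl
        | false => exact absurd (hcz.mpr h) hz
      have hz' : ¬ ((statuses.countP (fun s => s == "SUCCESS") : Int) = 0) := by
        exact_mod_cast hz
      simp [hne, ho, hany, hz']
      simpa using hany

-- ===== VERDICT (by name: the statement is the Claim_ definition above) =====
theorem check_overall_status_spec : Claim_equal_check_overall_status := by
  intro statuses _
  unfold Spec_check_overall_status
  exact pv_equal statuses
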